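-- pv_equiv track=rewrite | github.com/KhushiPunia06/compilerdesign | lex program.py | get_line_numbers
-- ===== SOURCE A (Python) =====
-- def get_line_numbers(tokens):
--     line_numbers = []
--     current_line_number = 1
--     for token in tokens:
--         line_numbers.append(current_line_number)
--         if token[1] == '\n':
--             current_line_number += 1
--     return line_numbers
-- ===== SOURCE B (Python) =====
-- def split_segments(tokens):
--     # lengths of the line segments: each segment ends with its newline token,
--     # the final segment (tokens after the last newline) may lack one
--     segs = []
--     rest = tokens
--     while rest:
--         for i, t in enumerate(rest):
--             if t[1] == '\n':
--                 segs.append(i + 1)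
--                 rest = rest[i + 1:]
--                 break
--         else:
--             segs.append(len(rest))
--             rest = []
--     return segs
--
-- def get_line_numbers(tokens):
--     segs = split_segments(tokens)
--     return [line for line, k in enumerate(segs, 1) for _ in range(k)]
-- ===== Notes on version B (the rewrite author's own statement) =====
-- stated objective: alternative
-- what changed: B first splits the token list into line segments (a recursive helper that finds the first newline token and recurses on the rest, producing segment lengths) and then run-length-expands those lengths into their 1-based line numbers, instead of A's single pass with a mutated running counter.
import Mathlib
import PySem

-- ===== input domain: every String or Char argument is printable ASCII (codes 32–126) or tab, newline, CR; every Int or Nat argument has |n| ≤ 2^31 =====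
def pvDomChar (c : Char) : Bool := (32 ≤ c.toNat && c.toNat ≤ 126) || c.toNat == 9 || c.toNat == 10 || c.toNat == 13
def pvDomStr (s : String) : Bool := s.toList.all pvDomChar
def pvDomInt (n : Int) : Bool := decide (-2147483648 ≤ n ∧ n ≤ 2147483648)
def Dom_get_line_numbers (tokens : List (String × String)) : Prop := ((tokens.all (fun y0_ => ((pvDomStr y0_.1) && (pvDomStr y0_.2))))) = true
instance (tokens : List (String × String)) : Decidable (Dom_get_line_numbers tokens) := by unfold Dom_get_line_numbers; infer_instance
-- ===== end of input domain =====

-- B splits the tokens into line segments (run lengths ending at each newline token)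
-- and then run-length-expands them with their 1-based line numbers, instead of A's
-- single loop that appends a mutated running counter; objective: alternative.


-- ===== PORT A =====
-- the for-loop over tokens with state (line_numbers, current_line_number)
def get_line_numbers (tokens : List (String × String)) : List Int :=
  (tokens.foldl
    (fun (st : List Int × Int) token =>
      (st.1 ++ [st.2], if token.2 = "\n" then st.2 + 1 else st.2))
    ([], 1)).1

-- ===== PORT B =====
-- split_segments' inner "for i, t in enumerate(tokens): if t[1] == '\n': return ..."
-- = scan for the index of the first newline token, carrying the running index i
def pvScanNl : List (String × String) → Nat → Option Nat
  | [], _ => none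
  | t :: ts, i => if t.2 = "\n" then some i else pvScanNl ts (i + 1)

-- split_segments: first-newline index found → emit i+1 and recurse on tokens[i+1:]
-- (tokens[i+1:] with i+1 ≥ 0 in range is exactly List.drop (i+1)); no newline →
-- [len(tokens)] if tokens else []
def split_segments (tokens : List (String × String)) : List Int :=
  match h : pvScanNl tokens 0 with
  | some i => ((i : Int) + 1) :: split_segments (tokens.drop (i + 1))
  | none => if tokens = [] then [] else [(tokens.length : Int)]
termination_by tokens.length
decreasing_by
  cases tokens with
  | nil => simp [pvScanNl] at h
  | cons a l => simp

-- the comprehension [line for line, k in enumerate(segs, 1) for _ in range(k)]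
def get_line_numbers_alt (tokens : List (String × String)) : List Int :=
  (PySem.List.enumerate (split_segments tokens) 1).flatMap
    (fun p => (PySem.List.pyRange 0 p.2 1).map (fun _ => p.1))

-- ===== PRECONDITION & SPEC =====
def Spec_get_line_numbers (tokens : List (String × String)) (out : List Int) : Prop := out = get_line_numbers_alt tokens
instance (tokens : List (String × String)) (out : List Int) : Decidable (Spec_get_line_numbers tokens out) := by unfold Spec_get_line_numbers; infer_instance

-- ===== CLAIM (what is proved, stated in full; the proofs are below) =====
def Claim_equal_get_line_numbers : Prop := ∀ (tokens : List (String × String)), Dom_get_line_numbers tokens → Spec_get_line_numbers tokens (get_line_numbers tokens)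

-- ===== LEMMAS AND PROOFS =====

-- reference form of A's loop: the list of line numbers starting at cur
def pvG : List (String × String) → Int → List Int
  | [], _ => []
  | t :: ts, cur => cur :: pvG ts (if t.2 = "\n" then cur + 1 else cur)

theorem pvFoldA (ts : List (String × String)) (acc : List Int) (cur : Int) :
    (ts.foldl
      (fun (st : List Int × Int) token =>
        (st.1 ++ [st.2], if token.2 = "\n" then st.2 + 1 else st.2))
      (acc, cur)).1 = acc ++ pvG ts cur := by
  induction ts generalizing acc cur with
  | nil => simp [pvG]
  | cons t ts ih => simp [List.foldl, pvG, ih]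

theorem pvScanNl_shift (ts : List (String × String)) (j : Nat) :
    pvScanNl ts j = (pvScanNl ts 0).map (· + j) := by
  induction ts generalizing j with
  | nil => simp [pvScanNl]
  | cons t ts ih =>
    by_cases h : t.2 = "\n"
    · simp [pvScanNl, h]
    · rw [pvScanNl, pvScanNl, if_neg h, if_neg h, ih (j + 1), ih 1]
      cases pvScanNl ts 0 <;> simp
      omega

theorem pvG_scan_some (ts : List (String × String)) (i : Nat) (cur : Int)
    (h : pvScanNl ts 0 = some i) :
    pvG ts cur = List.replicate (i + 1) cur ++ pvG (ts.drop (i + 1)) (cur + 1) := by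
  induction ts generalizing i cur with
  | nil => simp [pvScanNl] at h
  | cons t ts ih =>
    by_cases hn : t.2 = "\n"
    · rw [pvScanNl, if_pos hn] at h
      obtain rfl : i = 0 := by simpa using h.symm
      simp [pvG, hn]
    · rw [pvScanNl, if_neg hn, pvScanNl_shift] at h
      cases h0 : pvScanNl ts 0 with
      | none => rw [h0] at h; simp at h
      | some i' =>
        rw [h0] at h; simp at h
        obtain rfl : i = i' + 1 := by omega
        rw [pvG, if_neg hn, ih i' cur h0]
        simp [List.replicate_succ]
theorem pvG_scan_none (ts : List (String × String)) (cur : Int)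
    (h : pvScanNl ts 0 = none) :
    pvG ts cur = List.replicate ts.length cur := by
  induction ts generalizing cur with
  | nil => simp [pvG]
  | cons t ts ih =>
    by_cases hn : t.2 = "\n"
    · simp [pvScanNl, hn] at h
    · rw [pvScanNl, if_neg hn, pvScanNl_shift] at h
      cases h0 : pvScanNl ts 0 with
      | some i' => rw [h0] at h; simp at h
      | none => rw [pvG, if_neg hn, ih cur h0]; simp [List.replicate_succ]

theorem pvRange_map_const (n : Int) (c : Int) :
    (PySem.List.pyRange 0 n 1).map (fun _ => c) = List.replicate n.toNat c := by
  rw [List.map_const', PySem.List.length_pyRange_one]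
  simp

theorem pvMain (n : Nat) : ∀ (ts : List (String × String)), ts.length ≤ n → ∀ (cur : Int),
    pvG ts cur = (PySem.List.enumerate (split_segments ts) cur).flatMap
      (fun p => (PySem.List.pyRange 0 p.2 1).map (fun _ => p.1)) := by
  induction n with
  | zero =>
    intro ts hlen cur
    obtain rfl : ts = [] := List.eq_nil_of_length_eq_zero (Nat.le_zero.mp hlen)
    simp [pvG, split_segments, pvScanNl]
  | succ n ih =>
    intro ts hlen cur
    rw [split_segments]
    cases h : pvScanNl ts 0 with
    | some i =>
      have hne : ts ≠ [] := by rintro rfl; simp [pvScanNl] at h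
      rw [PySem.List.enumerate_cons, List.flatMap_cons]
      rw [pvG_scan_some ts i cur h, pvRange_map_const]
      have hdrop : (ts.drop (i + 1)).length ≤ n := by
        cases ts with
        | nil => exact absurd rfl hne
        | cons a l => simp at hlen ⊢; omega
      rw [ih (ts.drop (i + 1)) hdrop (cur + 1)]
      congr 1
    | none =>
      by_cases hnil : ts = []
      · subst hnil; simp [pvG, PySem.List.enumerate_nil]
      · rw [if_neg hnil, pvG_scan_none ts cur h]
        rw [PySem.List.enumerate_cons, PySem.List.enumerate_nil]
        rw [List.flatMap_cons, List.flatMap_nil, pvRange_map_const]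
        simp

-- ===== VERDICT (by name: the statement is the Claim_ definition above) =====
theorem get_line_numbers_spec : Claim_equal_get_line_numbers := by
  intro tokens _
  show get_line_numbers tokens = get_line_numbers_alt tokens
  rw [get_line_numbers, pvFoldA, get_line_numbers_alt, List.nil_append,
    pvMain tokens.length tokens le_rfl 1]
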